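-- pv_equiv track=rewrite | github.com/rubalo/joplin-mcp | src/joplin_mcp/notebook_utils.py | _find_notebook_suggestions
-- ===== SOURCE A (Python) =====
-- from typing import Any, Callable, Dict, List, Optional, TYPE_CHECKING
--
-- def _compute_notebook_path(
--     notebook_id: Optional[str],
--     notebooks_map: Dict[str, Dict[str, Optional[str]]],
--     sep: str = " / ",
-- ) -> Optional[str]:
--     """Compute full notebook path from root to the specified notebook.
--
--     Returns a string like "Parent / Child / Notebook" or None if unavailable.
--     """
--     if not notebook_id:
--         return None
--
--     parts: List[str] = []
--     seen: set[str] = set()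
--     curr = notebook_id
--     while curr and curr not in seen:
--         seen.add(curr)
--         info = notebooks_map.get(curr)
--         if not info:
--             break
--         title = (info.get("title") or "Untitled").strip()
--         parts.append(title)
--         curr = info.get("parent_id")
--
--     if not parts:
--         return None
--     return sep.join(reversed(parts))
--
-- def _find_notebook_suggestions(
--     search_term: str,
--     notebooks_map: Dict[str, Dict[str, Optional[str]]],
--     limit: int = 5,
-- ) -> List[str]:
--     """Find notebook paths containing search_term (case-insensitive).
--
--     Args:
--         search_term: Term to search for in notebook titles
--         notebooks_map: Map of notebook_id -> {title, parent_id}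
--         limit: Maximum number of suggestions to return
--
--     Returns:
--         List of full notebook paths containing the search term
--     """
--     search_lower = search_term.lower()
--     matching_paths = []
--
--     for nb_id, info in notebooks_map.items():
--         title = info.get("title", "")
--         if search_lower in title.lower():
--             full_path = _compute_notebook_path(nb_id, notebooks_map, sep="/")
--             if full_path:
--                 # Sort key: exact match first, then by path length (shorter = more relevant)
--                 is_exact = title.lower() == search_lower
--                 matching_paths.append((not is_exact, len(full_path), full_path))
--
--     # Sort by (not_exact, length) and return just the paths
--     matching_paths.sort()
--     return [path for _, _, path in matching_paths[:limit]]
-- ===== SOURCE B (Python) =====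
-- def _find_notebook_suggestions(search_term, notebooks_map, limit=5):
--     """Find notebook paths containing search_term (case-insensitive).
--
--     Same result as the original, but decomposed differently: candidates are
--     selected first by comprehension, and each full path is built by a
--     recursive descent over the parent chain that concatenates the string
--     top-down on return (no parts list, no reverse, no join).
--     """
--     sl = search_term.lower()
--
--     def path(curr, seen):
--         if not curr or curr in seen:
--             return None
--         info = notebooks_map.get(curr)
--         if not info:
--             return None
--         rest = path(info.get("parent_id"), seen | {curr})
--         title = (info.get("title") or "Untitled").strip()
--         return title if rest is None else rest + "/" + title
--
--     cands = [(nb_id, info.get("title", ""))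
--              for nb_id, info in notebooks_map.items()
--              if sl in info.get("title", "").lower()]
--     scored = sorted((t.lower() != sl, len(p), p)
--                     for nb_id, t in cands
--                     for p in [path(nb_id, set())]
--                     if p)
--     return [p for _, _, p in scored[:limit]]
-- ===== Notes on version B (the rewrite author's own statement) =====
-- stated objective: alternative
-- what changed: B replaces A's filter-and-build loop with staged comprehensions (select candidates, then score, then sort/slice) and replaces A's iterative collect-into-list / reverse / join path construction by a recursive descent over the parent chain that concatenates the path string top-down on return; same cost, different decomposition.
import Mathlib
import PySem

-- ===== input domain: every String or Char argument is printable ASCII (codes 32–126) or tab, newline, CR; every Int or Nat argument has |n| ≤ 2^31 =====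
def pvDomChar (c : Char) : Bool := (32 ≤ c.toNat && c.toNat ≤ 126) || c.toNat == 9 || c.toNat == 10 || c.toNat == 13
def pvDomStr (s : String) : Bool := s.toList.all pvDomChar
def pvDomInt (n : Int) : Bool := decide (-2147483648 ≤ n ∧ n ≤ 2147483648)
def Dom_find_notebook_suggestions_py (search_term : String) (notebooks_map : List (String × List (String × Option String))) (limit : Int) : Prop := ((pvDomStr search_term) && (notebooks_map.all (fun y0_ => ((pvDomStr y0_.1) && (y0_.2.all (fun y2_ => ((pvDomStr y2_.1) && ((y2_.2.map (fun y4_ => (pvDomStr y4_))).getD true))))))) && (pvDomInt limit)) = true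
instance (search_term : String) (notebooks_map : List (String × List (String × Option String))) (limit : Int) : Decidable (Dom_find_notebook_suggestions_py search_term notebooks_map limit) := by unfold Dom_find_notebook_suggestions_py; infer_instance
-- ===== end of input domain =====

-- B selects candidates by staged comprehensions and builds each path by a recursive
-- descent that concatenates the string top-down (no parts list / reverse / join);
-- an alternative decomposition with the same return value on every input of Pre_.

abbrev pvNbMap : Type := PySem.Dict String (PySem.Dict String (Option String))

-- ===== PORT A =====
-- A: (info.get("title") or "Untitled").strip()   ('' and None are falsy)
def pvA_titlePart (info : PySem.Dict String (Option String)) : String :=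
  PySem.Str.strip (match PySem.Dict.get? info "title" with
    | some (some t) => if t = "" then "Untitled" else t
    | _ => "Untitled")

-- A: curr = info.get("parent_id")   (missing key and explicit None are both None)
def pvA_parent (info : PySem.Dict String (Option String)) : Option String :=
  match PySem.Dict.get? info "parent_id" with
  | some (some p) => some p
  | _ => none

-- A: title = info.get("title", "")  (an explicit None value also falls to "" here;
-- Python A raises on it — excluded by Pre_ below)
def pvA_title0 (info : PySem.Dict String (Option String)) : String :=
  match PySem.Dict.get? info "title" with
  | some (some t) => t
  | _ => ""

-- A: the while-loop of _compute_notebook_path; fuel makes it structural (each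
-- iteration adds a fresh key of the map to `seen`, so `size map + 1` is enough).
def pvA_walk (m : pvNbMap) :
    Nat → Option String → PySem.Set String → List String → List String
  | 0, _, _, parts => parts
  | fuel+1, curr, seen, parts =>
    match curr with
    | none => parts
    | some c =>
      if c = "" then parts                             -- `while curr` : '' is falsy
      else if PySem.Set.contains seen c then parts     -- `curr not in seen`
      else
        match PySem.Dict.get? m c with
        | none => parts                                -- `if not info: break` (missing)
        | some info =>
          if info.items.isEmpty then parts             -- `if not info: break` (empty dict)
          else pvA_walk m fuel (pvA_parent info) (PySem.Set.add seen c)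
                 (parts ++ [pvA_titlePart info])

-- A: _compute_notebook_path(notebook_id, notebooks_map, sep="/")
def pvA_path (m : pvNbMap) (fuel : Nat) (nbId : String) : Option String :=
  if nbId = "" then none                               -- `if not notebook_id`
  else
    let parts := pvA_walk m fuel (some nbId) PySem.Set.empty []
    if parts = [] then none
    else some (PySem.Str.join "/" parts.reverse)

def find_notebook_suggestions_py (search_term : String) (notebooks_map : List (String × List (String × Option String))) (limit : Int) : List String :=
  let m : pvNbMap := PySem.Dict.ofList (notebooks_map.map (fun p => (p.1, PySem.Dict.ofList p.2)))
  let searchLower := PySem.Str.lower search_term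
  let matching : List (Int × Int × String) := m.items.foldl (fun acc p =>
    let title : String := pvA_title0 p.2
    if PySem.Str.isIn searchLower (PySem.Str.lower title) then
      match pvA_path m (notebooks_map.length + 1) p.1 with
      | some fp =>
        if fp = "" then acc                            -- `if full_path:` ('' is falsy)
        else acc ++ [((if PySem.Str.lower title = searchLower then (0:Int) else 1),
                      PySem.Str.len fp, fp)]           -- (not is_exact, len, path); bool as 0/1
      | none => acc
    else acc) []
  -- matching_paths.sort(): Python's lexicographic tuple order = the Lex key below
  let sortedm := PySem.List.sorted matching (fun t => toLex (t.1, toLex (t.2.1, t.2.2))) false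
  (PySem.List.slice sortedm none (some limit)).map (fun t => t.2.2)

-- ===== PORT B =====
-- B: the recursive `path(curr, seen)` — returns the finished path string, built
-- top-down on return: `title if rest is None else rest + "/" + title`.
-- Fuel makes the recursion structural (each call adds a fresh map key to `seen`).
def pvB_path (m : pvNbMap) : Nat → Option String → PySem.Set String → Option String
  | 0, _, _ => none
  | fuel+1, curr, seen =>
    match curr with
    | none => none                                     -- `if not curr ...: return None`
    | some c =>
      if c = "" then none
      else if PySem.Set.contains seen c then none      -- `... or curr in seen`
      else
        match PySem.Dict.get? m c with
        | none => none                                 -- `if not info: return None`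
        | some info =>
          if info.items.isEmpty then none
          else
            -- rest = path(info.get("parent_id"), seen | {curr})
            let rest := pvB_path m fuel ((PySem.Dict.get? info "parent_id").getD none)
                          (PySem.Set.union seen (PySem.Set.ofList [c]))
            -- title = (info.get("title") or "Untitled").strip()
            let title := PySem.Str.strip (match (PySem.Dict.get? info "title").getD none with
              | none => "Untitled"
              | some t => if t = "" then "Untitled" else t)
            some (match rest with
              | none => title
              | some r => r ++ "/" ++ title)           -- rest + "/" + title

def find_notebook_suggestions_py_alt (search_term : String) (notebooks_map : List (String × List (String × Option String))) (limit : Int) : List String :=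
  let m : pvNbMap := PySem.Dict.ofList (notebooks_map.map (fun p => (p.1, PySem.Dict.ofList p.2)))
  let sl := PySem.Str.lower search_term
  -- cands = [(nb_id, info.get("title","")) for ... if sl in info.get("title","").lower()]
  -- (an explicit None title makes Python B raise on .lower() too; excluded by Pre_)
  let cands : List (String × String) := m.items.filterMap (fun p =>
    let t := ((PySem.Dict.get? p.2 "title").getD (some "")).getD ""
    if PySem.Str.isIn sl (PySem.Str.lower t) then some (p.1, t) else none)
  -- scored = sorted((t.lower() != sl, len(p), p) for ... for p in [path(nb_id, set())] if p)
  let scored := PySem.List.sorted (cands.filterMap (fun q =>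
      match pvB_path m (notebooks_map.length + 1) (some q.1) PySem.Set.empty with
      | some p =>
        if p = "" then none                            -- `if p` ('' and None are falsy)
        else some ((if PySem.Str.lower q.2 ≠ sl then (1:Int) else 0), PySem.Str.len p, p)
      | none => none))
    (fun t => toLex (t.1, toLex (t.2.1, t.2.2))) false
  (PySem.List.slice scored none (some limit)).map (fun t => t.2.2)

-- ===== PRECONDITION & SPEC =====
-- Pre_ excludes exactly the inputs on which Python A raises: a notebook whose inner
-- dict maps "title" to an explicit None, where `title.lower()` is an AttributeError.
def Pre_find_notebook_suggestions_py (search_term : String) (notebooks_map : List (String × List (String × Option String))) (limit : Int) : Prop :=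
  ∀ p ∈ notebooks_map, PySem.Dict.get? (PySem.Dict.ofList p.2) "title" ≠ some none
instance (search_term : String) (notebooks_map : List (String × List (String × Option String))) (limit : Int) : Decidable (Pre_find_notebook_suggestions_py search_term notebooks_map limit) := by unfold Pre_find_notebook_suggestions_py; infer_instance

def pvWitness_find_notebook_suggestions_py : String × (List (String × List (String × Option String))) × Int :=
  ("note", [("id1", [("title", some "my note"), ("parent_id", none)]),
            ("id2", [("title", some "other"), ("parent_id", some "id1")])], 5)

def Spec_find_notebook_suggestions_py (search_term : String) (notebooks_map : List (String × List (String × Option String))) (limit : Int) (out : List String) : Prop := out = find_notebook_suggestions_py_alt search_term notebooks_map limit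
instance (search_term : String) (notebooks_map : List (String × List (String × Option String))) (limit : Int) (out : List String) : Decidable (Spec_find_notebook_suggestions_py search_term notebooks_map limit out) := by unfold Spec_find_notebook_suggestions_py; infer_instance

-- ===== CLAIM (what is proved, stated in full; the proofs are below) =====
def Claim_equal_find_notebook_suggestions_py : Prop := ∀ (search_term : String) (notebooks_map : List (String × List (String × Option String))) (limit : Int), Dom_find_notebook_suggestions_py search_term notebooks_map limit → Pre_find_notebook_suggestions_py search_term notebooks_map limit → Spec_find_notebook_suggestions_py search_term notebooks_map limit (find_notebook_suggestions_py search_term notebooks_map limit)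

-- ===== LEMMAS AND PROOFS =====

theorem pv_witness_ok :
    Dom_find_notebook_suggestions_py (pvWitness_find_notebook_suggestions_py.1) (pvWitness_find_notebook_suggestions_py.2.1) (pvWitness_find_notebook_suggestions_py.2.2) ∧
    Pre_find_notebook_suggestions_py (pvWitness_find_notebook_suggestions_py.1) (pvWitness_find_notebook_suggestions_py.2.1) (pvWitness_find_notebook_suggestions_py.2.2) := by
  exact ⟨by decide, by decide⟩

-- B's `.get(...)` ported through Option.getD equals A's explicit matches
theorem pvB_parent_eq (info : PySem.Dict String (Option String)) :
    (PySem.Dict.get? info "parent_id").getD none = pvA_parent info := by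
  unfold pvA_parent
  cases h : PySem.Dict.get? info "parent_id" with
  | none => rfl
  | some v => cases v <;> rfl

theorem pvB_title_eq (info : PySem.Dict String (Option String)) :
    PySem.Str.strip (match (PySem.Dict.get? info "title").getD none with
      | none => "Untitled"
      | some t => if t = "" then "Untitled" else t) = pvA_titlePart info := by
  unfold pvA_titlePart
  cases h : PySem.Dict.get? info "title" with
  | none => rfl
  | some v => cases v <;> rfl

theorem pvB_seen_eq (seen : PySem.Set String) (c : String) :
    PySem.Set.union seen (PySem.Set.ofList [c]) = PySem.Set.add seen c := rfl

theorem pv_join_one (a : String) : PySem.Str.join "/" [a] = a := by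
  apply String.toList_injective
  simp [PySem.Str.toList_join, PySem.Chars.join_singleton]

theorem pv_join_cc (a b : String) (l : List String) :
    PySem.Str.join "/" (a :: b :: l) = a ++ "/" ++ PySem.Str.join "/" (b :: l) := by
  apply String.toList_injective
  simp [PySem.Str.toList_join, PySem.Chars.join_cons_cons]

theorem pv_join_snoc (l : List String) (t : String) (h : l ≠ []) :
    PySem.Str.join "/" (l ++ [t]) = PySem.Str.join "/" l ++ "/" ++ t := by
  induction l with
  | nil => exact absurd rfl h
  | cons a l' ih =>
    cases l' with
    | nil => simp [pv_join_cc, pv_join_one]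
    | cons b l'' =>
      have h2 : PySem.Str.join "/" (b :: (l'' ++ [t]))
          = PySem.Str.join "/" (b :: l'') ++ "/" ++ t := by
        simpa using ih (by simp)
      calc PySem.Str.join "/" ((a :: b :: l'') ++ [t])
          = PySem.Str.join "/" (a :: b :: (l'' ++ [t])) := by simp
        _ = a ++ "/" ++ PySem.Str.join "/" (b :: (l'' ++ [t])) := pv_join_cc ..
        _ = a ++ "/" ++ (PySem.Str.join "/" (b :: l'') ++ "/" ++ t) := by rw [h2]
        _ = (a ++ "/" ++ PySem.Str.join "/" (b :: l'')) ++ "/" ++ t := by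
              simp [String.append_assoc]
        _ = PySem.Str.join "/" (a :: b :: l'') ++ "/" ++ t := by rw [pv_join_cc]

-- A's walk threads its accumulator: pull it out front
theorem pvA_walk_acc (m : pvNbMap) :
    ∀ (fuel : Nat) (curr : Option String) (seen : PySem.Set String) (parts : List String),
      pvA_walk m fuel curr seen parts = parts ++ pvA_walk m fuel curr seen [] := by
  intro fuel
  induction fuel with
  | zero => intro curr seen parts; simp [pvA_walk]
  | succ k ih =>
    intro curr seen parts
    cases curr with
    | none => simp [pvA_walk]
    | some c =>
      by_cases hc : c = ""
      · simp [pvA_walk, hc]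
      · by_cases hs : c ∈ seen
        · simp [pvA_walk, hc, hs]
        · cases hm : PySem.Dict.get? m c with
          | none => simp [pvA_walk, hc, hs, hm]
          | some info =>
            by_cases he : info.items = []
            · simp [pvA_walk, hc, hs, hm, he]
            · rw [show pvA_walk m (k+1) (some c) seen parts
                  = pvA_walk m k (pvA_parent info) (PySem.Set.add seen c)
                      (parts ++ [pvA_titlePart info]) by simp [pvA_walk, hc, hs, hm, he],
                  show pvA_walk m (k+1) (some c) seen []
                  = pvA_walk m k (pvA_parent info) (PySem.Set.add seen c)
                      ([] ++ [pvA_titlePart info]) by simp [pvA_walk, hc, hs, hm, he]]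
              rw [ih _ _ (parts ++ [pvA_titlePart info]), ih _ _ ([] ++ [pvA_titlePart info])]
              simp

-- the crux: B's recursive string construction = join "/" of A's reversed parts list
theorem pvB_path_eq_walk (m : pvNbMap) :
    ∀ (fuel : Nat) (curr : Option String) (seen : PySem.Set String),
      pvB_path m fuel curr seen
        = (if pvA_walk m fuel curr seen [] = [] then none
           else some (PySem.Str.join "/" (pvA_walk m fuel curr seen []).reverse)) := by
  intro fuel
  induction fuel with
  | zero => intro curr seen; simp [pvB_path, pvA_walk]
  | succ k ih =>
    intro curr seen
    cases curr with
    | none => simp [pvB_path, pvA_walk]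
    | some c =>
      by_cases hc : c = ""
      · simp [pvB_path, pvA_walk, hc]
      · by_cases hs : c ∈ seen
        · simp [pvB_path, pvA_walk, hc, hs]
        · cases hm : PySem.Dict.get? m c with
          | none => simp [pvB_path, pvA_walk, hc, hs, hm]
          | some info =>
            by_cases he : info.items = []
            · simp [pvB_path, pvA_walk, hc, hs, hm, he]
            · have hA : pvA_walk m (k+1) (some c) seen []
                  = pvA_titlePart info
                      :: pvA_walk m k (pvA_parent info) (PySem.Set.add seen c) [] := by
                rw [show pvA_walk m (k+1) (some c) seen []
                    = pvA_walk m k (pvA_parent info) (PySem.Set.add seen c)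
                        ([] ++ [pvA_titlePart info]) by simp [pvA_walk, hc, hs, hm, he]]
                rw [pvA_walk_acc m k _ _ ([] ++ [pvA_titlePart info])]
                simp
              have hB : pvB_path m (k+1) (some c) seen
                  = some (match pvB_path m k (pvA_parent info) (PySem.Set.add seen c) with
                      | none => pvA_titlePart info
                      | some r => r ++ "/" ++ pvA_titlePart info) := by
                rw [show pvB_path m (k+1) (some c) seen
                    = some (match pvB_path m k ((PySem.Dict.get? info "parent_id").getD none)
                          (PySem.Set.union seen (PySem.Set.ofList [c])) with
                        | none => PySem.Str.strip (match (PySem.Dict.get? info "title").getD none with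
                            | none => "Untitled"
                            | some t => if t = "" then "Untitled" else t)
                        | some r => r ++ "/" ++ PySem.Str.strip (match (PySem.Dict.get? info "title").getD none with
                            | none => "Untitled"
                            | some t => if t = "" then "Untitled" else t)) by
                  simp [pvB_path, hc, hs, hm, he]]
                rw [pvB_parent_eq, pvB_title_eq, pvB_seen_eq]
              rw [hB, hA, ih (pvA_parent info) (PySem.Set.add seen c)]
              cases hw : pvA_walk m k (pvA_parent info) (PySem.Set.add seen c) [] with
              | nil => simp [pv_join_one]
              | cons x w' =>
                have hne : ¬(x :: w') = [] := by simp
                have hne2 : (x :: w').reverse ≠ [] := by simp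
                rw [if_neg hne, if_neg (show ¬(pvA_titlePart info :: x :: w') = [] by simp)]
                rw [show (pvA_titlePart info :: x :: w').reverse
                    = (x :: w').reverse ++ [pvA_titlePart info] by simp]
                rw [pv_join_snoc _ _ hne2]

-- hence B's path = A's _compute_notebook_path (fuel a successor covers nbId = "")
theorem pvB_path_eq_A_path (m : pvNbMap) (k : Nat) (s : String) :
    pvB_path m (k+1) (some s) PySem.Set.empty = pvA_path m (k+1) s := by
  by_cases hs : s = ""
  · simp [pvB_path, pvA_path, hs]
  · rw [pvB_path_eq_walk]
    simp [pvA_path, hs]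

-- A's candidate step as one Option-valued function
def pvA_cand (m : pvNbMap) (N : Nat) (searchLower : String)
    (p : String × PySem.Dict String (Option String)) : Option (Int × Int × String) :=
  let title : String := pvA_title0 p.2
  if PySem.Str.isIn searchLower (PySem.Str.lower title) then
    match pvA_path m N p.1 with
    | some fp =>
      if fp = "" then none
      else some ((if PySem.Str.lower title = searchLower then (0:Int) else 1),
                 PySem.Str.len fp, fp)
    | none => none
  else none

-- A's append-fold is the filterMap of that step
theorem pvA_fold_eq_filterMap (m : pvNbMap) (N : Nat) (sl : String) :
    ∀ (l : List (String × PySem.Dict String (Option String))) (acc : List (Int × Int × String)),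
      (l.foldl (fun acc p =>
        let title : String := pvA_title0 p.2
        if PySem.Str.isIn sl (PySem.Str.lower title) then
          match pvA_path m N p.1 with
          | some fp =>
            if fp = "" then acc
            else acc ++ [((if PySem.Str.lower title = sl then (0:Int) else 1),
                          PySem.Str.len fp, fp)]
          | none => acc
        else acc) acc)
      = acc ++ l.filterMap (pvA_cand m N sl) := by
  intro l
  induction l with
  | nil => intro acc; simp
  | cons p l' ih =>
    intro acc
    rw [List.foldl_cons, List.filterMap_cons, ih]
    simp only [pvA_cand]
    by_cases h1 : PySem.Str.isIn sl (PySem.Str.lower (pvA_title0 p.2)) = true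
    · rw [if_pos h1, if_pos h1]
      cases hp : pvA_path m N p.1 with
      | none => simp
      | some fp =>
        dsimp only
        by_cases hfp : fp = ""
        · simp [hfp]
        · simp [hfp]
    · rw [if_neg h1, if_neg h1]

-- B's two staged filterMaps compute the same candidate step
theorem pvB_stages_eq (m : pvNbMap) (k : Nat) (sl : String)
    (l : List (String × PySem.Dict String (Option String))) :
    (l.filterMap (fun p =>
      let t := ((PySem.Dict.get? p.2 "title").getD (some "")).getD ""
      if PySem.Str.isIn sl (PySem.Str.lower t) then some (p.1, t) else none)).filterMap
      (fun q : String × String =>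
        match pvB_path m (k+1) (some q.1) PySem.Set.empty with
        | some p =>
          if p = "" then none
          else some ((if PySem.Str.lower q.2 ≠ sl then (1:Int) else 0), PySem.Str.len p, p)
        | none => none)
    = l.filterMap (pvA_cand m (k+1) sl) := by
  rw [List.filterMap_filterMap]
  apply List.filterMap_congr
  intro p _
  have ht : ((PySem.Dict.get? p.2 "title").getD (some "")).getD "" = pvA_title0 p.2 := by
    unfold pvA_title0
    cases h : PySem.Dict.get? p.2 "title" with
    | none => rfl
    | some v => cases v <;> rfl
  unfold pvA_cand
  simp only [ht]
  by_cases h1 : PySem.Str.isIn sl (PySem.Str.lower (pvA_title0 p.2)) = true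
  · rw [if_pos h1, if_pos h1]
    dsimp only [Option.bind]
    rw [pvB_path_eq_A_path]
    cases hp : pvA_path m (k+1) p.1 with
    | none => rfl
    | some fp =>
      by_cases hfp : fp = ""
      · simp [hfp]
      · have hswap : (if PySem.Str.lower (pvA_title0 p.2) ≠ sl then (1:Int) else 0)
            = (if PySem.Str.lower (pvA_title0 p.2) = sl then (0:Int) else 1) := by
          split_ifs with h2 h3 <;> first | rfl | exact absurd h3 h2
        simp [hfp, hswap]
  · rw [if_neg h1, if_neg h1]
    rfl

-- ===== VERDICT (by name: the statement is the Claim_ definition above) =====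
theorem find_notebook_suggestions_py_spec : Claim_equal_find_notebook_suggestions_py := by
  intro search_term notebooks_map limit _hDom _hPre
  unfold Spec_find_notebook_suggestions_py
  simp only [find_notebook_suggestions_py, find_notebook_suggestions_py_alt]
  rw [pvA_fold_eq_filterMap, ← pvB_stages_eq]
  rfl
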